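-- pv_equiv track=rewrite | github.com/circle-rd/upki-ra | server/utils/common.py | build_dn
-- ===== SOURCE A (Python) =====
-- def build_dn(components: dict[str, str]) -> str:
--     """Build a Distinguished Name from components.
--
--     Args:
--         components: Dictionary of DN components (CN, O, OU, C, ST, L).
--
--     Returns:
--         Distinguished Name string.
--     """
--     parts = []
--
--     # Order matters for DN
--     order = ["C", "ST", "L", "O", "OU", "CN"]
--
--     for key in order:
--         if key in components:
--             parts.append(f"{key}={components[key]}")
--
--     # Add any remaining components
--     for key, value in components.items():
--         if key not in order:
--             parts.append(f"{key}={value}")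
--
--     return "/".join(parts)
-- ===== SOURCE B (Python) =====
-- def build_dn(components: dict[str, str]) -> str:
--     """Build a Distinguished Name from components (single stable sort by rank)."""
--     order = ["C", "ST", "L", "O", "OU", "CN"]
--     rank = {key: i for i, key in enumerate(order)}
--     items = sorted(components.items(), key=lambda kv: rank.get(kv[0], len(order)))
--     return "/".join(f"{k}={v}" for k, v in items)
-- ===== Notes on version B (the rewrite author's own statement) =====
-- stated objective: idiomatic
-- what changed: A probes the dict once per ranked key and then rescans all items for leftovers in two passes; B builds a rank map and does one stable sort of the items by rank (unranked keys rank last, keeping insertion order) and joins.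
import Mathlib
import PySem

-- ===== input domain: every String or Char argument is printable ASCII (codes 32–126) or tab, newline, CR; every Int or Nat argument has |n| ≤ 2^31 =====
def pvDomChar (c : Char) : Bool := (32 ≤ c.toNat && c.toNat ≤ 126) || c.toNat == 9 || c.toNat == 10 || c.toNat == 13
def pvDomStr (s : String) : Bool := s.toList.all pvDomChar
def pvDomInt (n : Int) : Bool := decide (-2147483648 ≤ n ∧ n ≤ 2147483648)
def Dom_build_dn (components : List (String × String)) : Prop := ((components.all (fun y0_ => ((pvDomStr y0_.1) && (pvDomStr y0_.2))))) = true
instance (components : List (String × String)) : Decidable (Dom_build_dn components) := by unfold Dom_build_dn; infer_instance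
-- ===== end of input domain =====

-- B replaces A's two emit passes (probe the dict once per ranked key, then rescan all items
-- for leftovers) by ONE stable sort of the items under a rank map; objective: idiomatic.
-- The dict argument is modelled as an association list; Pre_ restricts to distinct keys,
-- the only lists that represent a Python dict.

-- ===== PORT A =====
-- order = ["C", "ST", "L", "O", "OU", "CN"]
def dnOrder : List String := ["C", "ST", "L", "O", "OU", "CN"]

def build_dn (components : List (String × String)) : String :=
  -- parts = []; for key in order: if key in components: parts.append(f"{key}={components[key]}")
  let parts : List String :=
    dnOrder.foldl (fun parts key =>
      match components.lookup key with
      | some v => parts ++ [key ++ "=" ++ v]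
      | none => parts) []
  -- for key, value in components.items(): if key not in order: parts.append(f"{key}={value}")
  let parts :=
    components.foldl (fun parts kv =>
      if !(dnOrder.contains kv.1) then parts ++ [kv.1 ++ "=" ++ kv.2] else parts) parts
  PySem.Str.join "/" parts

-- ===== PORT B =====
-- order = ["C", "ST", "L", "O", "OU", "CN"]  (B builds its own list)
def dnOrderB : List String := ["C", "ST", "L", "O", "OU", "CN"]

-- rank = {key: i for i, key in enumerate(order)}
def dnRank : PySem.Dict String Int :=
  PySem.Dict.ofList ((PySem.List.enumerate dnOrderB 0).map (fun p => (p.2, (p.1 : Int))))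

def build_dn_alt (components : List (String × String)) : String :=
  -- items = sorted(components.items(), key=lambda kv: rank.get(kv[0], len(order)))
  let items := PySem.List.sorted components
      (fun kv => dnRank.getD kv.1 (PySem.List.len dnOrderB)) false
  -- "/".join(f"{k}={v}" for k, v in items)
  PySem.Str.join "/" (items.map (fun kv => kv.1 ++ "=" ++ kv.2))

-- ===== PRECONDITION & SPEC =====
-- Pre_ excludes lists with duplicate keys: they do not correspond to any Python dict input
-- (dict construction collapses duplicates), so the association-list model is ambiguous there.
def Pre_build_dn (components : List (String × String)) : Prop :=
  (components.map Prod.fst).Nodup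
instance (components : List (String × String)) : Decidable (Pre_build_dn components) := by
  unfold Pre_build_dn; infer_instance

def pvWitness_build_dn : (List (String × String)) := [("CN", "alice"), ("C", "US"), ("emailAddress", "a@b")]

def Spec_build_dn (components : List (String × String)) (out : String) : Prop := out = build_dn_alt components
instance (components : List (String × String)) (out : String) : Decidable (Spec_build_dn components out) := by unfold Spec_build_dn; infer_instance

-- ===== CLAIM (what is proved, stated in full; the proofs are below) =====
def Claim_equal_build_dn : Prop := ∀ (components : List (String × String)), Dom_build_dn components → Pre_build_dn components → Spec_build_dn components (build_dn components)

-- ===== LEMMAS AND PROOFS =====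

-- the rank each key sorts under in B (6 = unranked)
def rankOf (k : String) : Int :=
  if k = "C" then 0 else if k = "ST" then 1 else if k = "L" then 2
  else if k = "O" then 3 else if k = "OU" then 4 else if k = "CN" then 5 else 6

-- the bucket of entries of a given rank
def bkt (i : Int) (xs : List (String × String)) : List (String × String) :=
  xs.filter (fun kv => rankOf kv.1 == i)

-- the part A's first loop emits for one ranked key
def oPart (components : List (String × String)) (key : String) : List String :=
  match components.lookup key with
  | some v => [key ++ "=" ++ v]
  | none => []

lemma rankOf_cases (k : String) :
    rankOf k = 0 ∨ rankOf k = 1 ∨ rankOf k = 2 ∨ rankOf k = 3 ∨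
    rankOf k = 4 ∨ rankOf k = 5 ∨ rankOf k = 6 := by
  unfold rankOf; split_ifs <;> simp

lemma getD_dnRank (k : String) :
    dnRank.getD k (PySem.List.len dnOrderB) = rankOf k := by
  have h : dnRank = PySem.Dict.mk [("C",0),("ST",1),("L",2),("O",3),("OU",4),("CN",5)] := by decide
  have hl : PySem.List.len dnOrderB = 6 := by decide
  rw [h, hl, PySem.Dict.getD_eq_get?_getD]
  by_cases h1 : k = "C"
  · subst h1; decide
  by_cases h2 : k = "ST"
  · subst h2; decide
  by_cases h3 : k = "L"
  · subst h3; decide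
  by_cases h4 : k = "O"
  · subst h4; decide
  by_cases h5 : k = "OU"
  · subst h5; decide
  by_cases h6 : k = "CN"
  · subst h6; decide
  simp only [PySem.Dict.get?_mk_cons, beq_iff_eq]
  rw [if_neg (fun hh => h1 hh.symm), if_neg (fun hh => h2 hh.symm), if_neg (fun hh => h3 hh.symm),
    if_neg (fun hh => h4 hh.symm), if_neg (fun hh => h5 hh.symm), if_neg (fun hh => h6 hh.symm)]
  unfold rankOf
  rw [if_neg h1, if_neg h2, if_neg h3, if_neg h4, if_neg h5, if_neg h6]
  rfl

lemma insertBy_skip {α : Type} (key : α → Int) (x : α) (l rest : List α)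
    (h : ∀ y ∈ l, key y ≤ key x) :
    PySem.List.insertBy (fun a b => decide (key a < key b)) x (l ++ rest) =
      l ++ PySem.List.insertBy (fun a b => decide (key a < key b)) x rest := by
  induction l with
  | nil => simp
  | cons y t ih =>
      have hy : ¬ key x < key y := by have := h y (by simp); omega
      simp [PySem.List.insertBy, hy, ih (fun z hz => h z (by simp [hz]))]

lemma insertBy_gt {α : Type} (key : α → Int) (x : α) (l : List α)
    (h : ∀ y ∈ l, key x < key y) :
    PySem.List.insertBy (fun a b => decide (key a < key b)) x l = x :: l := by
  cases l with
  | nil => rfl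
  | cons y t => simp [PySem.List.insertBy, h y (by simp)]

lemma insert_into {α : Type} (key : α → Int) (x : α) (l1 l2 : List α)
    (h1 : ∀ y ∈ l1, key y ≤ key x) (h2 : ∀ y ∈ l2, key x < key y) :
    PySem.List.insertBy (fun a b => decide (key a < key b)) x (l1 ++ l2) = l1 ++ (x :: l2) := by
  rw [insertBy_skip key x l1 l2 h1, insertBy_gt key x l2 h2]

lemma mem_bkt {i : Int} {y : String × String} {xs : List (String × String)}
    (h : y ∈ bkt i xs) : rankOf y.1 = i := by
  have := List.of_mem_filter h
  simpa using this

lemma sorted_buckets (xs : List (String × String)) :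
    PySem.List.sorted xs (fun kv => rankOf kv.1) false =
      bkt 0 xs ++ (bkt 1 xs ++ (bkt 2 xs ++ (bkt 3 xs ++ (bkt 4 xs ++ (bkt 5 xs ++ bkt 6 xs))))) := by
  induction xs using List.reverseRecOn with
  | nil => rfl
  | append_singleton xs x ih =>
      have hs : PySem.List.sorted (xs ++ [x]) (fun kv => rankOf kv.1) false
          = PySem.List.insertBy (fun a b => decide (rankOf a.1 < rankOf b.1)) x
              (PySem.List.sorted xs (fun kv => rankOf kv.1) false) := by
        rw [PySem.List.sorted_eq_foldl_insertBy, PySem.List.sorted_eq_foldl_insertBy,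
          List.foldl_append]
        rfl
      have hb : ∀ (i : Int), bkt i (xs ++ [x]) = bkt i xs ++ (if rankOf x.1 = i then [x] else []) := by
        intro i
        simp only [bkt, List.filter_append, List.filter_cons, List.filter_nil, beq_iff_eq]
      rw [hs, ih]
      rcases rankOf_cases x.1 with h|h|h|h|h|h|h
      · rw [insert_into (fun kv : String × String => rankOf kv.1) x (bkt 0 xs)
            (bkt 1 xs ++ (bkt 2 xs ++ (bkt 3 xs ++ (bkt 4 xs ++ (bkt 5 xs ++ bkt 6 xs)))))
            (by intro y hy; show rankOf y.1 ≤ rankOf x.1; rw [mem_bkt hy, h])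
            (by intro y hy; show rankOf x.1 < rankOf y.1
                simp only [List.mem_append] at hy
                rcases hy with hy|hy|hy|hy|hy|hy <;> rw [mem_bkt hy, h] <;> omega)]
        simp [hb, h, List.append_assoc]
      · rw [show bkt 0 xs ++ (bkt 1 xs ++ (bkt 2 xs ++ (bkt 3 xs ++ (bkt 4 xs ++ (bkt 5 xs ++ bkt 6 xs)))))
            = (bkt 0 xs ++ bkt 1 xs) ++ (bkt 2 xs ++ (bkt 3 xs ++ (bkt 4 xs ++ (bkt 5 xs ++ bkt 6 xs)))) from by simp [List.append_assoc],
          insert_into (fun kv : String × String => rankOf kv.1) x (bkt 0 xs ++ bkt 1 xs)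
            (bkt 2 xs ++ (bkt 3 xs ++ (bkt 4 xs ++ (bkt 5 xs ++ bkt 6 xs))))
            (by intro y hy; show rankOf y.1 ≤ rankOf x.1
                simp only [List.mem_append] at hy
                rcases hy with hy|hy <;> rw [mem_bkt hy, h] <;> omega)
            (by intro y hy; show rankOf x.1 < rankOf y.1
                simp only [List.mem_append] at hy
                rcases hy with hy|hy|hy|hy|hy <;> rw [mem_bkt hy, h] <;> omega)]
        simp [hb, h, List.append_assoc]
      · rw [show bkt 0 xs ++ (bkt 1 xs ++ (bkt 2 xs ++ (bkt 3 xs ++ (bkt 4 xs ++ (bkt 5 xs ++ bkt 6 xs)))))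
            = (bkt 0 xs ++ (bkt 1 xs ++ bkt 2 xs)) ++ (bkt 3 xs ++ (bkt 4 xs ++ (bkt 5 xs ++ bkt 6 xs))) from by simp [List.append_assoc],
          insert_into (fun kv : String × String => rankOf kv.1) x (bkt 0 xs ++ (bkt 1 xs ++ bkt 2 xs))
            (bkt 3 xs ++ (bkt 4 xs ++ (bkt 5 xs ++ bkt 6 xs)))
            (by intro y hy; show rankOf y.1 ≤ rankOf x.1
                simp only [List.mem_append] at hy
                rcases hy with hy|hy|hy <;> rw [mem_bkt hy, h] <;> omega)
            (by intro y hy; show rankOf x.1 < rankOf y.1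
                simp only [List.mem_append] at hy
                rcases hy with hy|hy|hy|hy <;> rw [mem_bkt hy, h] <;> omega)]
        simp [hb, h, List.append_assoc]
      · rw [show bkt 0 xs ++ (bkt 1 xs ++ (bkt 2 xs ++ (bkt 3 xs ++ (bkt 4 xs ++ (bkt 5 xs ++ bkt 6 xs)))))
            = (bkt 0 xs ++ (bkt 1 xs ++ (bkt 2 xs ++ bkt 3 xs))) ++ (bkt 4 xs ++ (bkt 5 xs ++ bkt 6 xs)) from by simp [List.append_assoc],
          insert_into (fun kv : String × String => rankOf kv.1) x (bkt 0 xs ++ (bkt 1 xs ++ (bkt 2 xs ++ bkt 3 xs)))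
            (bkt 4 xs ++ (bkt 5 xs ++ bkt 6 xs))
            (by intro y hy; show rankOf y.1 ≤ rankOf x.1
                simp only [List.mem_append] at hy
                rcases hy with hy|hy|hy|hy <;> rw [mem_bkt hy, h] <;> omega)
            (by intro y hy; show rankOf x.1 < rankOf y.1
                simp only [List.mem_append] at hy
                rcases hy with hy|hy|hy <;> rw [mem_bkt hy, h] <;> omega)]
        simp [hb, h, List.append_assoc]
      · rw [show bkt 0 xs ++ (bkt 1 xs ++ (bkt 2 xs ++ (bkt 3 xs ++ (bkt 4 xs ++ (bkt 5 xs ++ bkt 6 xs)))))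
            = (bkt 0 xs ++ (bkt 1 xs ++ (bkt 2 xs ++ (bkt 3 xs ++ bkt 4 xs)))) ++ (bkt 5 xs ++ bkt 6 xs) from by simp [List.append_assoc],
          insert_into (fun kv : String × String => rankOf kv.1) x (bkt 0 xs ++ (bkt 1 xs ++ (bkt 2 xs ++ (bkt 3 xs ++ bkt 4 xs))))
            (bkt 5 xs ++ bkt 6 xs)
            (by intro y hy; show rankOf y.1 ≤ rankOf x.1
                simp only [List.mem_append] at hy
                rcases hy with hy|hy|hy|hy|hy <;> rw [mem_bkt hy, h] <;> omega)
            (by intro y hy; show rankOf x.1 < rankOf y.1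
                simp only [List.mem_append] at hy
                rcases hy with hy|hy <;> rw [mem_bkt hy, h] <;> omega)]
        simp [hb, h, List.append_assoc]
      · rw [show bkt 0 xs ++ (bkt 1 xs ++ (bkt 2 xs ++ (bkt 3 xs ++ (bkt 4 xs ++ (bkt 5 xs ++ bkt 6 xs)))))
            = (bkt 0 xs ++ (bkt 1 xs ++ (bkt 2 xs ++ (bkt 3 xs ++ (bkt 4 xs ++ bkt 5 xs))))) ++ bkt 6 xs from by simp [List.append_assoc],
          insert_into (fun kv : String × String => rankOf kv.1) x (bkt 0 xs ++ (bkt 1 xs ++ (bkt 2 xs ++ (bkt 3 xs ++ (bkt 4 xs ++ bkt 5 xs)))))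
            (bkt 6 xs)
            (by intro y hy; show rankOf y.1 ≤ rankOf x.1
                simp only [List.mem_append] at hy
                rcases hy with hy|hy|hy|hy|hy|hy <;> rw [mem_bkt hy, h] <;> omega)
            (by intro y hy; show rankOf x.1 < rankOf y.1
                rw [mem_bkt hy, h]; omega)]
        simp [hb, h, List.append_assoc]
      · rw [show bkt 0 xs ++ (bkt 1 xs ++ (bkt 2 xs ++ (bkt 3 xs ++ (bkt 4 xs ++ (bkt 5 xs ++ bkt 6 xs)))))
            = (bkt 0 xs ++ (bkt 1 xs ++ (bkt 2 xs ++ (bkt 3 xs ++ (bkt 4 xs ++ (bkt 5 xs ++ bkt 6 xs)))))) ++ [] from by simp,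
          insert_into (fun kv : String × String => rankOf kv.1) x _ []
            (by intro y hy; show rankOf y.1 ≤ rankOf x.1
                simp only [List.mem_append] at hy
                rcases hy with hy|hy|hy|hy|hy|hy|hy <;> rw [mem_bkt hy, h] <;> omega)
            (by intro y hy; simp at hy)]
        simp [hb, h, List.append_assoc]

lemma loopA1 (components : List (String × String)) (ks : List String) (parts : List String) :
    ks.foldl (fun parts key =>
      match components.lookup key with
      | some v => parts ++ [key ++ "=" ++ v]
      | none => parts) parts = parts ++ ks.flatMap (oPart components) := by
  induction ks generalizing parts with
  | nil => simp
  | cons k t ih =>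
      cases h : components.lookup k <;>
        simp [List.foldl_cons, h, ih, oPart, List.append_assoc]

lemma filter_key_eq (k : String) (xs : List (String × String))
    (hnd : (xs.map Prod.fst).Nodup) :
    (xs.filter (fun kv => kv.1 == k)).map (fun kv => kv.1 ++ "=" ++ kv.2) = oPart xs k := by
  induction xs with
  | nil => rfl
  | cons a t ih =>
      obtain ⟨a1, a2⟩ := a
      simp only [List.map_cons, List.nodup_cons] at hnd
      by_cases h : a1 = k
      · have hfil : t.filter (fun kv => kv.1 == k) = [] := by
          rw [List.filter_eq_nil_iff]
          intro kv hkv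
          simp only [beq_iff_eq]
          intro hk
          have hm : kv.1 ∈ t.map Prod.fst := List.mem_map_of_mem hkv
          rw [hk, ← h] at hm
          exact hnd.1 hm
        simp only [List.filter_cons, beq_iff_eq, if_pos h, hfil, List.map_cons, List.map_nil]
        simp [oPart, List.lookup, h]
      · simp only [List.filter_cons, beq_iff_eq, if_neg h]
        rw [ih hnd.2]
        have hba : (k == a1) = false := by simp [Ne.symm h]
        simp [oPart, List.lookup, hba]

lemma bkt_eq_key (i : Int) (k : String) (hk : ∀ s, (rankOf s == i) = (s == k))
    (xs : List (String × String)) :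
    bkt i xs = xs.filter (fun kv => kv.1 == k) := by
  unfold bkt
  exact List.filter_congr (fun kv _ => hk kv.1)

lemma rank0 : ∀ s, (rankOf s == (0:Int)) = (s == "C") := by
  intro s; unfold rankOf; split_ifs <;> simp_all
lemma rank1 : ∀ s, (rankOf s == (1:Int)) = (s == "ST") := by
  intro s; unfold rankOf; split_ifs <;> simp_all
lemma rank2 : ∀ s, (rankOf s == (2:Int)) = (s == "L") := by
  intro s; unfold rankOf; split_ifs <;> simp_all
lemma rank3 : ∀ s, (rankOf s == (3:Int)) = (s == "O") := by
  intro s; unfold rankOf; split_ifs <;> simp_all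
lemma rank4 : ∀ s, (rankOf s == (4:Int)) = (s == "OU") := by
  intro s; unfold rankOf; split_ifs <;> simp_all
lemma rank5 : ∀ s, (rankOf s == (5:Int)) = (s == "CN") := by
  intro s; unfold rankOf; split_ifs <;> simp_all

lemma bkt_six (xs : List (String × String)) :
    bkt 6 xs = xs.filter (fun kv => !(dnOrder.contains kv.1)) := by
  unfold bkt
  refine List.filter_congr (fun kv _ => ?_)
  unfold rankOf dnOrder
  split_ifs <;> simp_all

-- ===== VERDICT (by name: the statement is the Claim_ definition above) =====
theorem build_dn_spec : Claim_equal_build_dn := by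
  intro components _hdom hpre
  unfold Pre_build_dn at hpre
  show build_dn components = build_dn_alt components
  simp only [build_dn, build_dn_alt]
  have hkey : (fun kv : String × String => dnRank.getD kv.1 (PySem.List.len dnOrderB))
      = (fun kv : String × String => rankOf kv.1) := funext (fun kv => getD_dnRank kv.1)
  rw [hkey, sorted_buckets, loopA1, PySem.List.foldl_append_if]
  congr 1
  simp only [List.nil_append, List.map_append]
  rw [bkt_eq_key 0 "C" rank0, bkt_eq_key 1 "ST" rank1, bkt_eq_key 2 "L" rank2,
    bkt_eq_key 3 "O" rank3, bkt_eq_key 4 "OU" rank4, bkt_eq_key 5 "CN" rank5, bkt_six,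
    filter_key_eq "C" components hpre, filter_key_eq "ST" components hpre,
    filter_key_eq "L" components hpre, filter_key_eq "O" components hpre,
    filter_key_eq "OU" components hpre, filter_key_eq "CN" components hpre]
  simp [dnOrder, List.append_assoc]
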